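-- pv_equiv track=rewrite | github.com/Malcolmt129/COSC431-Project | server/data.py | max_draw
-- ===== SOURCE A (Python) =====
-- def max_draw(row):
--     local_max = 0
--     max_drawdown = 0
--     for num in row:
--         if num < 0:
--             local_max+=num
--             if local_max < max_drawdown:
--                 max_drawdown = local_max
--         else:
--             local_max = 0
--     return max_drawdown
-- ===== SOURCE B (Python) =====
-- def max_draw(row):
--     # Partition row into maximal runs of same sign-class, sum the negative
--     # runs, and take the minimum of 0 and all run sums.
--     run_sums = []
--     i, n = 0, len(row)
--     while i < n:
--         neg = row[i] < 0
--         j = i + 1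
--         while j < n and (row[j] < 0) == neg:
--             j += 1
--         if neg:
--             run_sums.append(sum(row[i:j]))
--         i = j
--     return min([0] + run_sums)
-- ===== Notes on version B (the rewrite author's own statement) =====
-- stated objective: alternative
-- what changed: Replaces A's single stateful accumulator pass (local running sum + running minimum) with a group-then-sum-then-reduce pipeline: split the row into maximal runs of consecutive negatives, sum each negative run, and return the minimum of 0 and those run sums.
import Mathlib
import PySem

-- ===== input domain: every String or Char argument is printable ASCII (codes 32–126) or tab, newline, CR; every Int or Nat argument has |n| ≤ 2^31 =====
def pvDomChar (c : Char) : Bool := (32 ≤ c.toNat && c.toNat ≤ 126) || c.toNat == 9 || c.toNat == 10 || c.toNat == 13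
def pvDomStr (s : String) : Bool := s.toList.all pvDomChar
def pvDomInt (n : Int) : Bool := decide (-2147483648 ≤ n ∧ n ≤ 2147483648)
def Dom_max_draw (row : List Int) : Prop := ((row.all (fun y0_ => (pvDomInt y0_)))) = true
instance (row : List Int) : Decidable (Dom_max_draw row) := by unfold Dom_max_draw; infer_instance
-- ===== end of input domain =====

-- B replaces A's stateful accumulator pass with: group into maximal negative runs, sum each, take min with 0.

-- ===== PORT A =====
-- Literal transliteration: fold carrying (local_max, max_drawdown).
def max_draw (row : List Int) : Int :=
  (row.foldl (fun (st : Int × Int) num =>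
      if num < 0 then
        let lm := st.1 + num
        (lm, if lm < st.2 then lm else st.2)
      else (0, st.2)) ((0 : Int), (0 : Int))).2

-- ===== PORT B =====
-- B's outer while loop: split off the maximal run with the head's sign class
-- (inner while = takeWhile/dropWhile), recurse on the remainder.
def pyRuns (row : List Int) : List (Bool × List Int) :=
  match row with
  | [] => []
  | x :: t =>
    (decide (x < 0), x :: t.takeWhile (fun y => decide (y < 0) == decide (x < 0))) ::
      pyRuns (t.dropWhile (fun y => decide (y < 0) == decide (x < 0)))
termination_by row.length
decreasing_by
  simp only [List.length_cons]
  exact Nat.lt_succ_of_le (List.length_dropWhile_le _ _)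

def max_draw_alt (row : List Int) : Int :=
  ((pyRuns row).filterMap (fun p => if p.1 then some p.2.sum else none)).foldl min 0

-- ===== PRECONDITION & SPEC =====
def Spec_max_draw (row : List Int) (out : Int) : Prop := out = max_draw_alt row
instance (row : List Int) (out : Int) : Decidable (Spec_max_draw row out) := by unfold Spec_max_draw; infer_instance

-- ===== CLAIM (what is proved, stated in full; the proofs are below) =====
def Claim_equal_max_draw : Prop := ∀ (row : List Int), Dom_max_draw row → Spec_max_draw row (max_draw row)

-- ===== LEMMAS AND PROOFS =====

-- Minimum of all "prefix sums of the current trailing negative run", offset by lm.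
def bAux : List Int → Int → Int
  | [], _ => 0
  | x :: xs, lm => if x < 0 then min (lm + x) (bAux xs (lm + x)) else bAux xs 0

theorem foldl_eq_bAux (row : List Int) : ∀ lm md : Int, md ≤ 0 →
    (row.foldl (fun (st : Int × Int) num =>
      if num < 0 then
        let lm := st.1 + num
        (lm, if lm < st.2 then lm else st.2)
      else (0, st.2)) (lm, md)).2 = min md (bAux row lm) := by
  induction row with
  | nil => intro lm md h; simp [bAux]; omega
  | cons x xs ih =>
    intro lm md h
    by_cases hx : x < 0
    · simp only [List.foldl_cons, if_pos hx, bAux]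
      rw [ih (lm + x) _ (by omega)]
      omega
    · simp only [List.foldl_cons, if_neg hx, bAux]
      rw [ih 0 md h]

theorem sum_nonpos_of_neg (g : List Int) (h : ∀ y ∈ g, y < 0) : g.sum ≤ 0 := by
  induction g with
  | nil => simp
  | cons x t ih =>
    simp only [List.sum_cons]
    have := h x (by simp)
    have := ih (fun y hy => h y (by simp [hy]))
    omega

theorem bAux_nonneg_run (g : List Int) : ∀ rest lm, g ≠ [] → (∀ y ∈ g, ¬ y < 0) →
    bAux (g ++ rest) lm = bAux rest 0 := by
  induction g with
  | nil => intro _ _ h; exact absurd rfl h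
  | cons x t ih =>
    intro rest lm _ hall
    simp only [List.cons_append, bAux, if_neg (hall x (by simp))]
    rcases t with _ | ⟨y, t'⟩
    · simp
    · exact ih rest 0 (by simp) (fun y hy => hall y (by simp [hy]))

theorem bAux_neg_run (g : List Int) : ∀ rest lm, g ≠ [] → (∀ y ∈ g, y < 0) →
    bAux (g ++ rest) lm = min (lm + g.sum) (bAux rest (lm + g.sum)) := by
  induction g with
  | nil => intro _ _ h; exact absurd rfl h
  | cons x t ih =>
    intro rest lm _ hall
    simp only [List.cons_append, bAux, if_pos (hall x (by simp)), List.sum_cons]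
    rcases t with _ | ⟨y, t'⟩
    · simp
    · rw [ih rest (lm + x) (by simp) (fun y hy => hall y (by simp [hy]))]
      have hs : (y :: t').sum ≤ 0 :=
        sum_nonpos_of_neg _ (fun z hz => hall z (by simp [hz]))
      have h1 : lm + x + (y :: t').sum ≤ lm + x := by omega
      have h2 : bAux rest (lm + x + (y :: t').sum) = bAux rest (lm + (x + (y :: t').sum)) := by
        ring_nf
      rw [h2]
      omega

theorem bAux_reset (rest : List Int) (s : Int)
    (h : ∀ hd, rest.head? = some hd → ¬ hd < 0) : bAux rest s = bAux rest 0 := by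
  rcases rest with _ | ⟨y, t⟩
  · rfl
  · have := h y rfl
    simp [bAux, this]

theorem foldl_min_shift (L : List Int) : ∀ a : Int, a ≤ 0 →
    L.foldl min a = min a (L.foldl min 0) := by
  induction L with
  | nil => intro a h; simp; omega
  | cons x t ih =>
    intro a h
    simp only [List.foldl_cons]
    rw [ih (min a x) (by omega), ih (min 0 x) (by omega)]
    omega

theorem filterMap_runs_true (g : List Int) (L : List (Bool × List Int)) :
    List.filterMap (fun p => if p.1 then some p.2.sum else none) ((true, g) :: L) =
      g.sum :: List.filterMap (fun p => if p.1 then some p.2.sum else none) L := by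
  simp

theorem filterMap_runs_false (g : List Int) (L : List (Bool × List Int)) :
    List.filterMap (fun p => if p.1 then some p.2.sum else none) ((false, g) :: L) =
      List.filterMap (fun p => if p.1 then some p.2.sum else none) L := by
  simp

theorem bAux_eq_alt (row : List Int) :
    bAux row 0 = ((pyRuns row).filterMap (fun p => if p.1 then some p.2.sum else none)).foldl min 0 := by
  induction row using pyRuns.induct with
  | case1 => simp [pyRuns, bAux]
  | case2 x t ih =>
    rw [pyRuns]
    have hsplit : x :: t =
        (x :: t.takeWhile (fun y => decide (y < 0) == decide (x < 0))) ++
          t.dropWhile (fun y => decide (y < 0) == decide (x < 0)) := by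
      simp [List.takeWhile_append_dropWhile]
    by_cases hx : x < 0
    · have hk : decide (x < 0) = true := by simp [hx]
      have hg : ∀ y ∈ x :: t.takeWhile (fun y => decide (y < 0) == decide (x < 0)), y < 0 := by
        intro y hy
        rcases List.mem_cons.1 hy with h | h
        · omega
        · have := List.mem_takeWhile_imp h
          simp [hk] at this; exact this
      have hrest : ∀ hd, (t.dropWhile (fun y => decide (y < 0) == decide (x < 0))).head? = some hd → ¬ hd < 0 := by
        intro hd hhd
        have := List.head?_dropWhile_not (fun y => decide (y < 0) == decide (x < 0)) t
        rw [hhd] at this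
        simp [hk] at this; omega
      rw [hsplit, bAux_neg_run _ _ _ (by simp) hg, Int.zero_add,
        bAux_reset _ _ hrest, ih, hk, filterMap_runs_true, List.foldl_cons]
      have hs : (x :: t.takeWhile (fun y => decide (y < 0) == true)).sum ≤ 0 := by
        refine sum_nonpos_of_neg _ ?_
        intro y hy
        rcases List.mem_cons.1 hy with h | h
        · omega
        · have := List.mem_takeWhile_imp h
          simpa using this
      rw [foldl_min_shift _ _ (by omega : min (0 : Int) ((x :: t.takeWhile (fun y => decide (y < 0) == true)).sum) ≤ 0)]
      omega
    · have hk : decide (x < 0) = false := by simp [hx]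
      have hg : ∀ y ∈ x :: t.takeWhile (fun y => decide (y < 0) == decide (x < 0)), ¬ y < 0 := by
        intro y hy
        rcases List.mem_cons.1 hy with h | h
        · omega
        · have := List.mem_takeWhile_imp h
          simp [hk] at this; omega
      rw [hsplit, bAux_nonneg_run _ _ _ (by simp) hg, ih, hk, filterMap_runs_false]

-- ===== VERDICT (by name: the statement is the Claim_ definition above) =====
theorem max_draw_spec : Claim_equal_max_draw := by
  intro row _
  show max_draw row = max_draw_alt row
  unfold max_draw max_draw_alt
  rw [foldl_eq_bAux row 0 0 le_rfl, bAux_eq_alt]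
  have : ((pyRuns row).filterMap (fun p => if p.1 then some p.2.sum else none)).foldl min 0 ≤ 0 := by
    rw [foldl_min_shift _ 0 le_rfl]; omega
  omega
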